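-- pv_equiv track=rewrite | github.com/LocusLontrime/Python | CodeWars_Rush/4kyu/Palindrome_Counter_4kyu.py | count_palindromes_aux
-- ===== SOURCE A (Python) =====
-- def count_palindromes_aux(a: int):
--     a_str = str(a)
--     max_power_of_ten_in = len(a_str) - 1
--     palindromes_counter = count_palindromes_before_power_of_ten(max_power_of_ten_in)
--     for i in range((len(a_str) + 1) // 2):
--         digit_ = int(a_str[i])
--         palindromes_counter += (d_ := (digit_ - (0 if i else 1)) * 10 ** ((len(a_str) + 1) // 2 - i - 1))
--     last_one = 1 if int((part := a_str[:(l_ := len(a_str) // 2)]) + (f'' if len(a_str) % 2 == 0 else f'{a_str[l_]}') + part[::-1]) <= a else 0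
--     return palindromes_counter + last_one
--
-- def count_palindromes_at_power_of_ten(power_of_ten: int):
--     return 1 if power_of_ten == 0 else 9 * 10 ** ((power_of_ten - 1) // 2)
--
-- def count_palindromes_before_power_of_ten(power_of_ten: int):
--     return sum([count_palindromes_at_power_of_ten(p_) for p_ in range(power_of_ten + 1)])
-- ===== SOURCE B (Python) =====
-- def count_palindromes_aux(a: int):
--     # Closed-form count: shorter-length palindromes by formula, full-length ones
--     # by a single division for the half, plus the mirrored boundary check.
--     s = str(a)
--     L = len(s)
--     half = (L + 1) // 2
--     m = L - 1
--     base = 2 * 10 ** (m // 2) - 1 if m % 2 == 0 else 11 * 10 ** (m // 2) - 1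
--     H = a // 10 ** (L // 2)
--     total = base + H - 10 ** (half - 1)
--     pal = int(s[:half] + s[:L // 2][::-1])
--     return total + (1 if pal <= a else 0)
-- ===== Notes on version B (the rewrite author's own statement) =====
-- stated objective: simpler
-- what changed: A's per-digit weighted accumulation loop over the leading half and its helper sum over all shorter lengths are replaced by closed forms: a single integer division of a for the half-count and a parity formula for the shorter-length palindrome count, keeping only the one mirrored-boundary comparison.
import Mathlib
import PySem

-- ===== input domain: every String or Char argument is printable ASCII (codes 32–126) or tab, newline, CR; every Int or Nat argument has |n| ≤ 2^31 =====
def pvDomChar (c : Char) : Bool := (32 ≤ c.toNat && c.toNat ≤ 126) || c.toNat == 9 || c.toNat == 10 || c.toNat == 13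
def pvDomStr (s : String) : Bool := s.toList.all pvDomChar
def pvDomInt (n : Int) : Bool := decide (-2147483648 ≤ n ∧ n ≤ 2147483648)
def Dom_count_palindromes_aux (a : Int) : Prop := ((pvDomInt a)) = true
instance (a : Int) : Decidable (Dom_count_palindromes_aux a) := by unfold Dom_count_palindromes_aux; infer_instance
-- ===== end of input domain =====

-- B replaces A's per-digit weighted accumulation loop and A's helper sum over the shorter
-- lengths by closed forms: one integer division for the leading half and one parity formula
-- for the shorter-length count (objective: simpler).

-- ===== PORT A =====
-- count_palindromes_at_power_of_ten; the exponent (p-1)//2 is only reached with p ≥ 1, so .toNat is exact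
def cpapot (p : Int) : Int :=
  if p = 0 then 1 else 9 * 10 ^ (PySem.Int.floordiv (p - 1) 2).toNat

-- count_palindromes_before_power_of_ten
def cpbpot (p : Int) : Int :=
  (((PySem.List.pyRange 0 (p + 1) 1).map (fun q => cpapot q)).sum)

-- string values are carried as List Char (PySem.Int.toChars = str(n).toList);
-- int(...) is PySem.Int.ofChars?; inside Pre_ every index is in range and every parse succeeds,
-- so pyGetD / .getD 0 stand for the raising forms
def count_palindromes_aux (a : Int) : Int :=
  let aStr := PySem.Int.toChars a
  let maxPow : Int := (aStr.length : Int) - 1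
  let counter0 := cpbpot maxPow
  let half : Int := PySem.Int.floordiv ((aStr.length : Int) + 1) 2
  -- for i in range((len+1)//2): counter += (int(a_str[i]) - (0 if i else 1)) * 10**(half-i-1)
  let counter := (PySem.List.pyRange 0 half 1).foldl
    (fun acc i =>
      acc + (((PySem.Int.ofChars? [PySem.List.pyGetD aStr i ' ']).getD 0)
              - (if i = 0 then 1 else 0)) * 10 ^ (half - i - 1).toNat) counter0
  let l : Int := PySem.Int.floordiv (aStr.length : Int) 2
  let part := PySem.List.slice aStr none (some l)
  let mid : List Char := if PySem.Int.mod (aStr.length : Int) 2 = 0 then [] else [PySem.List.pyGetD aStr l ' ']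
  let lastOne : Int :=
    if (PySem.Int.ofChars? (part ++ mid ++ ((PySem.List.slice? part none none (-1)).getD []))).getD 0 ≤ a then 1 else 0
  counter + lastOne

-- ===== PORT B =====
def count_palindromes_aux_alt (a : Int) : Int :=
  let s := PySem.Int.toChars a
  let L : Int := (s.length : Int)
  let half : Int := PySem.Int.floordiv (L + 1) 2
  let m : Int := L - 1
  let base : Int :=
    if PySem.Int.mod m 2 = 0 then 2 * 10 ^ (PySem.Int.floordiv m 2).toNat - 1
    else 11 * 10 ^ (PySem.Int.floordiv m 2).toNat - 1
  let H : Int := PySem.Int.floordiv a (10 ^ (PySem.Int.floordiv L 2).toNat)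
  let total : Int := base + H - 10 ^ (half - 1).toNat
  let pal : Int :=
    (PySem.Int.ofChars? (PySem.List.slice s none (some half) ++
      ((PySem.List.slice? (PySem.List.slice s none (some (PySem.Int.floordiv L 2))) none none (-1)).getD []))).getD 0
  total + (if pal ≤ a then 1 else 0)

-- ===== PRECONDITION & SPEC =====
-- Pre_ excludes a < 0: there str(a) starts with '-' and A raises ValueError at int(a_str[0]).
def Pre_count_palindromes_aux (a : Int) : Prop := 0 ≤ a
instance (a : Int) : Decidable (Pre_count_palindromes_aux a) := by unfold Pre_count_palindromes_aux; infer_instance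
def pvWitness_count_palindromes_aux : Int := (12345)

def Spec_count_palindromes_aux (a : Int) (out : Int) : Prop := out = count_palindromes_aux_alt a
instance (a : Int) (out : Int) : Decidable (Spec_count_palindromes_aux a out) := by unfold Spec_count_palindromes_aux; infer_instance

-- ===== CLAIM (what is proved, stated in full; the proofs are below) =====
def Claim_equal_count_palindromes_aux : Prop := ∀ (a : Int), Dom_count_palindromes_aux a → Pre_count_palindromes_aux a → Spec_count_palindromes_aux a (count_palindromes_aux a)

-- ===== LEMMAS AND PROOFS =====

-- str(n) for n > 0 is the most-significant-first list of decimal digit characters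
theorem toDigitsCore_eq (fuel : ℕ) : ∀ (n : ℕ) (ds : List Char), n < fuel →
    Nat.toDigitsCore 10 fuel n ds =
      (if n = 0 then ['0'] else ((Nat.digits 10 n).map Nat.digitChar).reverse) ++ ds := by
  induction fuel with
  | zero => intro n ds h; omega
  | succ f ih =>
    intro n ds h
    rw [Nat.toDigitsCore]
    by_cases h0 : n = 0
    · subst h0; simp; rfl
    · have h10 : (1:ℕ) < 10 := by norm_num
      rw [Nat.digits_def' h10 (Nat.pos_of_ne_zero h0)]
      by_cases hq : n / 10 = 0
      · simp [hq, h0, Nat.digits_zero]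
      · have hlt : n / 10 < f := by
          have := Nat.div_lt_self (Nat.pos_of_ne_zero h0) (by norm_num : (1:ℕ) < 10)
          omega
        simp [hq, h0, ih (n / 10) _ hlt]

theorem toChars_of_pos (n : ℕ) (h : 0 < n) :
    PySem.Int.toChars (n : Int) = ((Nat.digits 10 n).map Nat.digitChar).reverse := by
  have : ¬ ((n : Int) < 0) := by omega
  simp only [PySem.Int.toChars, this, if_false, Int.toNat_natCast]
  rw [Nat.toDigits, toDigitsCore_eq (n+1) n [] (by omega)]
  have hne : n ≠ 0 := by omega
  simp [hne]

-- int() of a single decimal digit character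
theorem ofChars?_digitChar (d : ℕ) (h : d < 10) :
    PySem.Int.ofChars? [Nat.digitChar d] = some (d : Int) := by
  interval_cases d <;> decide

theorem digits_tail (m : ℕ) : (Nat.digits 10 m).tail = Nat.digits 10 (m / 10) := by
  rcases Nat.eq_zero_or_pos m with h | h
  · subst h; simp
  · rw [Nat.digits_def' (by norm_num : (1:ℕ) < 10) h]; rfl

theorem digits_drop (j n : ℕ) : (Nat.digits 10 n).drop j = Nat.digits 10 (n / 10 ^ j) := by
  induction j generalizing n with
  | zero => simp
  | succ j ih =>
    rw [← List.tail_drop, ih, digits_tail, Nat.div_div_eq_div_mul, pow_succ]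

theorem ofDigits_eq_sum (l : List ℕ) :
    Nat.ofDigits 10 l = ∑ t ∈ Finset.range l.length, (l[t]?.getD 0) * 10 ^ t := by
  induction l with
  | nil => simp
  | cons hd tl ih =>
    rw [Nat.ofDigits_cons, ih]
    simp only [List.length_cons]
    rw [Finset.sum_range_succ']
    simp only [List.getElem?_cons_succ, List.getElem?_cons_zero, Option.getD_some, pow_zero,
      mul_one, pow_succ, Finset.mul_sum]
    have h : ∀ t ∈ Finset.range tl.length,
        10 * (tl[t]?.getD 0 * 10 ^ t) = tl[t]?.getD 0 * (10 ^ t * 10) := by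
      intro t _; ring
    rw [Finset.sum_congr rfl h]
    exact Nat.add_comm _ _

-- the weighted sum of the leading k digits is division by 10^(L-k)
theorem digit_prefix_sum (n k : ℕ) (hk : k ≤ (Nat.digits 10 n).length) :
    ∑ i ∈ Finset.range k,
        ((Nat.digits 10 n).reverse[i]?.getD 0) * 10 ^ (k - 1 - i) =
      n / 10 ^ ((Nat.digits 10 n).length - k) := by
  have hrev : ∀ i, i < k →
      (Nat.digits 10 n).reverse[i]?.getD 0
        = ((Nat.digits 10 n).drop ((Nat.digits 10 n).length - k))[k-1-i]?.getD 0 := by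
    intro i hi
    have hidx : (Nat.digits 10 n).length - 1 - i = ((Nat.digits 10 n).length - k) + (k - 1 - i) := by
      omega
    rw [List.getElem?_reverse (by omega), List.getElem?_drop, hidx]
  calc ∑ i ∈ Finset.range k, ((Nat.digits 10 n).reverse[i]?.getD 0) * 10 ^ (k - 1 - i)
      = ∑ i ∈ Finset.range k,
          (((Nat.digits 10 n).drop ((Nat.digits 10 n).length - k))[k-1-i]?.getD 0) * 10 ^ (k - 1 - i) := by
        apply Finset.sum_congr rfl; intro i hi
        rw [hrev i (Finset.mem_range.mp hi)]
    _ = ∑ t ∈ Finset.range k,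
          (((Nat.digits 10 n).drop ((Nat.digits 10 n).length - k))[t]?.getD 0) * 10 ^ t :=
        Finset.sum_range_reflect
          (fun t => (((Nat.digits 10 n).drop ((Nat.digits 10 n).length - k))[t]?.getD 0) * 10 ^ t) k
    _ = Nat.ofDigits 10 ((Nat.digits 10 n).drop ((Nat.digits 10 n).length - k)) := by
        have hlen : ((Nat.digits 10 n).drop ((Nat.digits 10 n).length - k)).length = k := by
          rw [List.length_drop]; omega
        rw [ofDigits_eq_sum, hlen]
    _ = n / 10 ^ ((Nat.digits 10 n).length - k) := by rw [digits_drop, Nat.ofDigits_digits]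

theorem fd2 (m : ℕ) : PySem.Int.floordiv (m : Int) 2 = ((m / 2 : ℕ) : Int) := by
  rw [show ((2:Int) = ((2:ℕ):Int)) from rfl, PySem.Int.floordiv_natCast]

theorem md2 (m : ℕ) : PySem.Int.mod (m : Int) 2 = ((m % 2 : ℕ) : Int) := by
  rw [show ((2:Int) = ((2:ℕ):Int)) from rfl, PySem.Int.mod_natCast]

theorem cpapot_succ (m : ℕ) : cpapot ((m : Int) + 1) = 9 * 10 ^ (m / 2) := by
  have h1 : ((m : Int) + 1) - 1 = (m : Int) := by ring
  have h2 : ((m : Int) + 1) ≠ 0 := by omega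
  simp only [cpapot, if_neg h2, h1, fd2, Int.toNat_natCast]

-- A's helper sum in closed form
theorem cpbpot_closed (m : ℕ) :
    cpbpot (m : Int) = if m % 2 = 0 then 2 * 10 ^ (m / 2) - 1 else 11 * 10 ^ (m / 2) - 1 := by
  induction m with
  | zero => decide
  | succ m ih =>
    have hstep : ((m : Int) + 1 + 1) = ((m : Int) + 1) + 1 := by ring
    have hcast : ((m + 1 : ℕ) : Int) = (m : Int) + 1 := by push_cast; ring
    unfold cpbpot
    rw [hcast, hstep, PySem.List.pyRange_one_succ_right (by omega), List.map_append, List.sum_append]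
    have ih' := ih
    unfold cpbpot at ih'
    rw [ih']
    simp only [List.map_cons, List.map_nil, List.sum_cons, List.sum_nil, add_zero]
    rw [cpapot_succ m]
    rcases Nat.even_or_odd m with he | ho
    · have h0 : m % 2 = 0 := Nat.even_iff.mp he
      have h1 : (m+1) % 2 = 1 := by omega
      have h2 : (m+1)/2 = m/2 := by omega
      simp only [h0, h1, h2]
      norm_num
      have : (1:Int) ≤ 10 ^ (m/2) := one_le_pow₀ (by norm_num)
      omega
    · have h0 : m % 2 = 1 := Nat.odd_iff.mp ho
      have h1 : (m+1) % 2 = 0 := by omega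
      have h2 : (m+1)/2 = m/2 + 1 := by omega
      simp only [h0, h1, h2]
      norm_num [pow_succ]
      have : (1:Int) ≤ 10 ^ (m/2) := one_le_pow₀ (by norm_num)
      omega

theorem list_sum_map_range (f : ℕ → ℤ) (m : ℕ) :
    ((List.range m).map f).sum = ∑ i ∈ Finset.range m, f i := by
  induction m with
  | zero => simp
  | succ m ih => rw [List.range_succ, List.map_append, List.sum_append, Finset.sum_range_succ, ih]; simp

theorem main_pos (n : ℕ) (hn : 0 < n) :
    count_palindromes_aux (n : Int) = count_palindromes_aux_alt (n : Int) := by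
  have h10 : (1:ℕ) < 10 := by norm_num
  have hs : PySem.Int.toChars (n : Int) = (Nat.digits 10 n).reverse.map Nat.digitChar := by
    rw [toChars_of_pos n hn, ← List.map_reverse]
  have hLpos : 0 < (Nat.digits 10 n).length :=
    List.length_pos_iff.mpr (Nat.digits_ne_nil_iff_ne_zero.mpr (by omega))
  unfold count_palindromes_aux count_palindromes_aux_alt
  simp only [hs, List.length_map, List.length_reverse]
  set l := Nat.digits 10 n with hl
  set s := List.map Nat.digitChar l.reverse with hsd
  set L := l.length with hLd
  have hsL : s.length = L := by rw [hsd]; simp [hLd]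
  -- arithmetic normalisation: every PySem int op becomes a cast of a ℕ op
  have e1 : ((L:Int) + 1) = (((L+1 : ℕ)) : Int) := by push_cast; ring
  have e2 : ((L:Int) - 1) = (((L-1 : ℕ)) : Int) := by omega
  rw [e1, e2, fd2 (L+1), fd2 (L-1), fd2 L, md2 (L-1), md2 L, cpbpot_closed (L-1)]
  simp only [Int.toNat_natCast, Nat.cast_eq_zero]
  set k := (L+1)/2 with hkd
  have hkL : k ≤ L := by omega
  have hk1 : 1 ≤ k := by omega
  -- B's division for the half
  have eH : PySem.Int.floordiv (↑n) ((10:Int) ^ (L/2)) = ((n / 10 ^ (L/2) : ℕ) : Int) := by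
    rw [show ((10:Int) ^ (L/2)) = (((10 ^ (L/2) : ℕ)) : Int) by push_cast; ring,
      PySem.Int.floordiv_natCast]
  rw [eH]
  have ek : ((k:Int) - 1).toNat = k - 1 := by omega
  rw [ek]
  -- slices and the mirrored tail
  rw [PySem.List.slice_to_natCast s (L/2), PySem.List.slice_to_natCast s k,
    PySem.List.slice?_none_none_neg_one]
  simp only [Option.getD_some]
  -- the two half-prefixes agree: take (L/2) plus the middle digit is take k
  have emid : List.take (L/2) s ++ (if L % 2 = 0 then ([]:List Char)
      else [PySem.List.pyGetD s (((L/2:ℕ)):Int) ' ']) = List.take k s := by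
    rcases Nat.even_or_odd L with he | ho
    · have h0 : L % 2 = 0 := Nat.even_iff.mp he
      have hk2 : k = L/2 := by omega
      simp [h0, hk2]
    · have h1 : L % 2 = 1 := Nat.odd_iff.mp ho
      have hlt : L/2 < s.length := by omega
      have hget : PySem.List.pyGetD s (((L/2:ℕ)):Int) ' ' = s[L/2] := by
        rw [PySem.List.pyGetD_eq_getElem s ' ' (by omega) (by exact_mod_cast hlt)]
        simp only [Int.toNat_natCast]
      have hk2 : k = L/2 + 1 := by omega
      rw [hget, hk2, List.take_add_one, List.getElem?_eq_getElem hlt]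
      simp [h1]
  rw [emid]
  -- A's digit loop: foldl → sum → division by 10^(L-k)
  rw [PySem.List.foldl_add, PySem.List.pyRange_one]
  simp only [List.map_map, sub_zero, Int.toNat_natCast, Function.comp_def, zero_add]
  rw [list_sum_map_range]
  have hdig : ∀ i, i < k → (PySem.Int.ofChars? [PySem.List.pyGetD s ((i:ℕ):Int) ' ']).getD 0
      = ((l.reverse[i]?.getD 0 : ℕ) : Int) := by
    intro i hi
    have hilt : i < s.length := by omega
    have hget : PySem.List.pyGetD s ((i:ℕ):Int) ' ' = s[i] := by
      rw [PySem.List.pyGetD_eq_getElem s ' ' (by omega) (by exact_mod_cast hilt)]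
      simp only [Int.toNat_natCast]
    have hirev : i < l.reverse.length := by simp; omega
    have hmem : l.reverse[i] ∈ l := List.mem_reverse.mp (List.getElem_mem hirev)
    have hdlt : l.reverse[i] < 10 := Nat.digits_lt_base h10 hmem
    have hchar : s[i]'hilt = Nat.digitChar (l.reverse[i]'hirev) := by
      simp only [hsd, List.getElem_map]
    rw [hget, hchar, ofChars?_digitChar _ hdlt]
    rw [List.getElem?_eq_getElem hirev]
    simp
  have hsum : ∑ i ∈ Finset.range k,
      ((PySem.Int.ofChars? [PySem.List.pyGetD s ((i:ℕ):Int) ' ']).getD 0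
        - (if (i:Int) = 0 then 1 else 0)) * 10 ^ (((k:ℕ):Int) - ↑i - 1).toNat
      = ((n / 10 ^ (L - k) : ℕ) : Int) - 10 ^ (k-1) := by
    have step : ∀ i ∈ Finset.range k,
        ((PySem.Int.ofChars? [PySem.List.pyGetD s ((i:ℕ):Int) ' ']).getD 0
          - (if (i:Int) = 0 then 1 else 0)) * 10 ^ (((k:ℕ):Int) - ↑i - 1).toNat
        = (((l.reverse[i]?.getD 0 * 10 ^ (k-1-i) : ℕ)) : Int)
            - (if i = 0 then (10:Int) ^ (k-1) else 0) := by
      intro i hi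
      have hik : i < k := Finset.mem_range.mp hi
      have etn : (((k:ℕ):Int) - ↑i - 1).toNat = k - 1 - i := by omega
      rw [hdig i hik, etn]
      rcases Nat.eq_zero_or_pos i with h0 | hp
      · subst h0; push_cast; simp [sub_mul]
      · have hne : ¬ ((i:Int) = 0) := by omega
        have hne' : ¬ (i = 0) := by omega
        push_cast
        simp [hne']
    rw [Finset.sum_congr rfl step, Finset.sum_sub_distrib]
    congr 1
    · rw [← Nat.cast_sum]
      norm_cast
      exact digit_prefix_sum n k (by rw [← hl, ← hLd]; omega)
    · rw [Finset.sum_ite_eq' (Finset.range k) 0 (fun _ => (10:Int) ^ (k-1))]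
      rw [if_pos (Finset.mem_range.mpr (by omega))]
  rw [hsum]
  have hLk : L - k = L/2 := by omega
  rw [hLk]
  ring

-- ===== VERDICT (by name: the statement is the Claim_ definition above) =====
theorem count_palindromes_aux_spec : Claim_equal_count_palindromes_aux := by
  intro a _ hpre
  unfold Spec_count_palindromes_aux
  rcases eq_or_lt_of_le hpre with h0 | hpos
  · rw [← h0]; decide
  · lift a to ℕ using hpre with n
    exact main_pos n (by exact_mod_cast hpos)
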